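-- pv_equiv track=rewrite | github.com/SzymonGlab/KiKD | lab6/244755/stats.py | count_error
-- ===== SOURCE A (Python) =====
-- def count_error(pixels1, pixels2):
--     errors = [0, 0, 0, 0]
--     for i in range(len(pixels1)):
--
--         errors[0] += (pixels1[i][0] - pixels2[i][0]) ** 2
--         errors[1] += (pixels1[i][1] - pixels2[i][1]) ** 2
--         errors[2] += (pixels1[i][2] - pixels2[i][2]) ** 2
--         errors[3] += (
--             (pixels1[i][0] - pixels2[i][0]) ** 2 + (pixels1[i][1] -
--                                                     pixels2[i][1]) ** 2 +
--             (pixels1[i][2] - pixels2[i][2]) ** 2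
--         )
--
--     return errors
-- ===== SOURCE B (Python) =====
-- def count_error(pixels1, pixels2):
--     n = len(pixels1)
--     e0 = sum((pixels1[i][0] - pixels2[i][0]) ** 2 for i in range(n))
--     e1 = sum((pixels1[i][1] - pixels2[i][1]) ** 2 for i in range(n))
--     e2 = sum((pixels1[i][2] - pixels2[i][2]) ** 2 for i in range(n))
--     return [e0, e1, e2, e0 + e1 + e2]
-- ===== Notes on version B (the rewrite author's own statement) =====
-- stated objective: simpler
-- what changed: Replaces the single loop mutating a 4-slot accumulator list with three independent per-channel comprehension sums, deriving the fourth entry as e0+e1+e2 in closed form.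
import Mathlib
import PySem

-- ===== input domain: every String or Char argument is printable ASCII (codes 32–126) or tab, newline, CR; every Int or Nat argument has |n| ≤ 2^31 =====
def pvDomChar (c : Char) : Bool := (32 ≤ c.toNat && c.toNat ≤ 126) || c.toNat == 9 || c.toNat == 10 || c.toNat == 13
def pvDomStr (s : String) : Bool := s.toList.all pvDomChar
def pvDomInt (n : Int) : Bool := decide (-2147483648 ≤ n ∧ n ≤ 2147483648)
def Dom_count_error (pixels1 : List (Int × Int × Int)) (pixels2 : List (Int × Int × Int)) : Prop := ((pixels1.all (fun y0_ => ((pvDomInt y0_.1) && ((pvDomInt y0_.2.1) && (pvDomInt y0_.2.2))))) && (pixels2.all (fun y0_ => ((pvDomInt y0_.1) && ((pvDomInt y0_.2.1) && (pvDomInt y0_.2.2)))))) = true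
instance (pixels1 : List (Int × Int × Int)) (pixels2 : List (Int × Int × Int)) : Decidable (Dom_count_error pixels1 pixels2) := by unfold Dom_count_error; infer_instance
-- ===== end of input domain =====

-- B replaces A's single loop over a mutable 4-slot error list with three independent
-- per-channel comprehension sums, deriving the fourth entry as e0+e1+e2 (simpler decomposition).


-- ===== PORT A =====
-- A: one pass, mutating errors = [0,0,0,0]; ported as a foldl over range(len(pixels1))
-- carrying the four accumulators.  xs[i] is in range under Pre_, so pyGetD is exact there.
def count_error (pixels1 : List (Int × Int × Int)) (pixels2 : List (Int × Int × Int)) : List Int :=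
  let errors : Int × Int × Int × Int :=
    (PySem.List.pyRange 0 pixels1.length 1).foldl
      (fun e i =>
        let a := PySem.List.pyGetD pixels1 i (0, 0, 0)
        let b := PySem.List.pyGetD pixels2 i (0, 0, 0)
        (e.1 + (a.1 - b.1) ^ 2,
         e.2.1 + (a.2.1 - b.2.1) ^ 2,
         e.2.2.1 + (a.2.2 - b.2.2) ^ 2,
         e.2.2.2 + ((a.1 - b.1) ^ 2 + (a.2.1 - b.2.1) ^ 2 + (a.2.2 - b.2.2) ^ 2)))
      (0, 0, 0, 0)
  [errors.1, errors.2.1, errors.2.2.1, errors.2.2.2]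

-- ===== PORT B =====
-- B: three independent per-channel comprehension sums; fourth entry derived as e0+e1+e2.
def count_error_alt (pixels1 : List (Int × Int × Int)) (pixels2 : List (Int × Int × Int)) : List Int :=
  let n : Int := pixels1.length
  let e0 := ((PySem.List.pyRange 0 n 1).map (fun i =>
    ((PySem.List.pyGetD pixels1 i (0, 0, 0)).1 - (PySem.List.pyGetD pixels2 i (0, 0, 0)).1) ^ 2)).sum
  let e1 := ((PySem.List.pyRange 0 n 1).map (fun i =>
    ((PySem.List.pyGetD pixels1 i (0, 0, 0)).2.1 - (PySem.List.pyGetD pixels2 i (0, 0, 0)).2.1) ^ 2)).sum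
  let e2 := ((PySem.List.pyRange 0 n 1).map (fun i =>
    ((PySem.List.pyGetD pixels1 i (0, 0, 0)).2.2 - (PySem.List.pyGetD pixels2 i (0, 0, 0)).2.2) ^ 2)).sum
  [e0, e1, e2, e0 + e1 + e2]

-- ===== PRECONDITION & SPEC =====
-- Python A raises IndexError when pixels2 is shorter than pixels1; exactly those inputs are excluded.
def Pre_count_error (pixels1 : List (Int × Int × Int)) (pixels2 : List (Int × Int × Int)) : Prop :=
  pixels1.length ≤ pixels2.length
instance (pixels1 : List (Int × Int × Int)) (pixels2 : List (Int × Int × Int)) : Decidable (Pre_count_error pixels1 pixels2) := by unfold Pre_count_error; infer_instance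

def pvWitness_count_error : (List (Int × Int × Int)) × (List (Int × Int × Int)) :=
  ([(1, 2, 3), (0, 5, 0)], [(0, 0, 0), (1, 1, 1)])

def Spec_count_error (pixels1 : List (Int × Int × Int)) (pixels2 : List (Int × Int × Int)) (out : List Int) : Prop := out = count_error_alt pixels1 pixels2
instance (pixels1 : List (Int × Int × Int)) (pixels2 : List (Int × Int × Int)) (out : List Int) : Decidable (Spec_count_error pixels1 pixels2 out) := by unfold Spec_count_error; infer_instance

-- ===== CLAIM (what is proved, stated in full; the proofs are below) =====
def Claim_equal_count_error : Prop := ∀ (pixels1 : List (Int × Int × Int)) (pixels2 : List (Int × Int × Int)), Dom_count_error pixels1 pixels2 → Pre_count_error pixels1 pixels2 → Spec_count_error pixels1 pixels2 (count_error pixels1 pixels2)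

-- ===== LEMMAS AND PROOFS =====

-- A's fold over range(n) computes, in its four slots, the three per-channel sums and their total.
theorem count_error_fold_eq
    (pixels1 pixels2 : List (Int × Int × Int)) (n : Nat) :
    (PySem.List.pyRange 0 (n : Int) 1).foldl
      (fun (e : Int × Int × Int × Int) i =>
        let a := PySem.List.pyGetD pixels1 i (0, 0, 0)
        let b := PySem.List.pyGetD pixels2 i (0, 0, 0)
        (e.1 + (a.1 - b.1) ^ 2,
         e.2.1 + (a.2.1 - b.2.1) ^ 2,
         e.2.2.1 + (a.2.2 - b.2.2) ^ 2,
         e.2.2.2 + ((a.1 - b.1) ^ 2 + (a.2.1 - b.2.1) ^ 2 + (a.2.2 - b.2.2) ^ 2)))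
      (0, 0, 0, 0)
    = (((PySem.List.pyRange 0 (n : Int) 1).map (fun i =>
          ((PySem.List.pyGetD pixels1 i (0, 0, 0)).1 - (PySem.List.pyGetD pixels2 i (0, 0, 0)).1) ^ 2)).sum,
       ((PySem.List.pyRange 0 (n : Int) 1).map (fun i =>
          ((PySem.List.pyGetD pixels1 i (0, 0, 0)).2.1 - (PySem.List.pyGetD pixels2 i (0, 0, 0)).2.1) ^ 2)).sum,
       ((PySem.List.pyRange 0 (n : Int) 1).map (fun i =>
          ((PySem.List.pyGetD pixels1 i (0, 0, 0)).2.2 - (PySem.List.pyGetD pixels2 i (0, 0, 0)).2.2) ^ 2)).sum,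
       ((PySem.List.pyRange 0 (n : Int) 1).map (fun i =>
          ((PySem.List.pyGetD pixels1 i (0, 0, 0)).1 - (PySem.List.pyGetD pixels2 i (0, 0, 0)).1) ^ 2)).sum +
       ((PySem.List.pyRange 0 (n : Int) 1).map (fun i =>
          ((PySem.List.pyGetD pixels1 i (0, 0, 0)).2.1 - (PySem.List.pyGetD pixels2 i (0, 0, 0)).2.1) ^ 2)).sum +
       ((PySem.List.pyRange 0 (n : Int) 1).map (fun i =>
          ((PySem.List.pyGetD pixels1 i (0, 0, 0)).2.2 - (PySem.List.pyGetD pixels2 i (0, 0, 0)).2.2) ^ 2)).sum) := by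
  induction n with
  | zero => simp
  | succ m ih =>
      have h : ((m : Int) + 1) = ((m + 1 : Nat) : Int) := by push_cast; ring
      rw [← h, PySem.List.pyRange_one_succ_right (by positivity),
        List.foldl_append, List.map_append, List.map_append, List.map_append, ih]
      simp
      ring_nf

theorem count_error_spec' (pixels1 pixels2 : List (Int × Int × Int)) :
    count_error pixels1 pixels2 = count_error_alt pixels1 pixels2 := by
  unfold count_error count_error_alt
  rw [count_error_fold_eq pixels1 pixels2 pixels1.length]

-- ===== VERDICT (by name: the statement is the Claim_ definition above) =====
theorem count_error_spec : Claim_equal_count_error := by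
  intro p1 p2 _ _
  unfold Spec_count_error
  exact count_error_spec' p1 p2
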